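-- pv_equiv track=rewrite | github.com/kody-w/RAR | agents/@aibast-agents-library/general_stacks/email_drafting_stack/email_drafting_agent.py | _count_personalization_tokens
-- ===== SOURCE A (Python) =====
-- def _count_personalization_tokens(template_body):
--     count = 0
--     i = 0
--     while i < len(template_body):
--         if template_body[i] == '{':
--             j = template_body.find('}', i)
--             if j != -1:
--                 count += 1
--                 i = j + 1
--             else:
--                 i += 1
--         else:
--             i += 1
--     return count
-- ===== SOURCE B (Python) =====
-- def _count_personalization_tokens(template_body):
--     count = 0
--     inside = False
--     for ch in template_body:
--         if inside:
--             if ch == '}':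
--                 count += 1
--                 inside = False
--         elif ch == '{':
--             inside = True
--     return count
-- ===== Notes on version B (the rewrite author's own statement) =====
-- stated objective: simpler
-- what changed: Replaces the index-based while loop with str.find jumps by a single forward pass over the characters maintaining one boolean state that records whether an opening brace is pending; no index bookkeeping or substring search.
import Mathlib
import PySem

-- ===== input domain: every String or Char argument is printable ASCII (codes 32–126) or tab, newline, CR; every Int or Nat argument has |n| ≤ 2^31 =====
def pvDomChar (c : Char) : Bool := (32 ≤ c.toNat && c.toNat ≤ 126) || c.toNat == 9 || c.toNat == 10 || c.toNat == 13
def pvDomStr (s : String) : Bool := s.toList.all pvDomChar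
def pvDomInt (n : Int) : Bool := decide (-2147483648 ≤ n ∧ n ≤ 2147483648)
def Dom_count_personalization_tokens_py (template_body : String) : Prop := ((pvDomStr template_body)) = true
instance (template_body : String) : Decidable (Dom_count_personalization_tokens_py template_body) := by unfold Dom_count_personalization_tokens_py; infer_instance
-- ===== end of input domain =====

-- B replaces A's index-based while loop with str.find jumps by a single forward
-- pass keeping one boolean "inside a token" state (simpler; same O(n) cost).


-- ===== PORT A =====
-- A's while loop: index i, on '{' do j = s.find('}', i); if found, count += 1 and
-- jump to j + 1, else i += 1.  Recursion on the remaining length s.length - i.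
def pvALoop (s : List Char) (i : Nat) (count : Int) : Int :=
  if h : i < s.length then
    if s[i] = '{' then
      let j := PySem.Chars.findFrom s ['}'] i none
      if hj : j ≠ -1 then
        pvALoop s (j.toNat + 1) (count + 1)
      else
        pvALoop s (i + 1) count
    else
      pvALoop s (i + 1) count
  else count
termination_by s.length - i
decreasing_by
  · have hspec := (PySem.Chars.findFrom_natCast_spec s ['}'] i (le_of_lt h) hj).1
    omega
  · omega
  · omega

def count_personalization_tokens_py (template_body : String) : Int :=
  pvALoop template_body.toList 0 0

-- ===== PORT B =====
-- B's for-loop over the characters with state (inside, count).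
def pvScan (l : List Char) (inside : Bool) (count : Int) : Int :=
  match l with
  | [] => count
  | ch :: t =>
    if inside then
      if ch = '}' then pvScan t false (count + 1) else pvScan t true count
    else
      if ch = '{' then pvScan t true count else pvScan t false count

def count_personalization_tokens_py_alt (template_body : String) : Int :=
  pvScan template_body.toList false 0

-- ===== PRECONDITION & SPEC =====
def Spec_count_personalization_tokens_py (template_body : String) (out : Int) : Prop := out = count_personalization_tokens_py_alt template_body
instance (template_body : String) (out : Int) : Decidable (Spec_count_personalization_tokens_py template_body out) := by unfold Spec_count_personalization_tokens_py; infer_instance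

-- ===== CLAIM (what is proved, stated in full; the proofs are below) =====
def Claim_equal_count_personalization_tokens_py : Prop := ∀ (template_body : String), Dom_count_personalization_tokens_py template_body → Spec_count_personalization_tokens_py template_body (count_personalization_tokens_py template_body)

-- ===== LEMMAS AND PROOFS =====

theorem singleton_prefix_iff {α : Type} (a : α) (l : List α) :
    [a] <+: l ↔ l.head? = some a := by
  cases l with
  | nil => simp
  | cons x t =>
    constructor
    · rintro ⟨r, hr⟩
      injection hr with h1 h2
      simp [← h1]
    · intro hx
      simp at hx
      exact ⟨t, by simp [hx]⟩

theorem singleton_infix_iff {α : Type} (a : α) (l : List α) :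
    [a] <:+: l ↔ a ∈ l := by
  constructor
  · intro h; exact h.subset (List.mem_singleton_self a)
  · intro h
    obtain ⟨s, t, rfl⟩ := List.append_of_mem h
    exact ⟨s, t, by simp⟩

theorem mem_drop_succ {α : Type} (l : List α) (i : Nat) (a : α)
    (h : a ∈ l.drop (i + 1)) : a ∈ l.drop i := by
  have h2 : l.drop (i + 1) = (l.drop i).drop 1 := by
    rw [List.drop_drop]
  exact List.drop_subset 1 (l.drop i) (h2 ▸ h)

theorem pvScan_no_close (l : List Char) (b : Bool) (c : Int)
    (h : '}' ∉ l) : pvScan l b c = c := by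
  induction l generalizing b with
  | nil => rfl
  | cons x t ih =>
    simp only [List.mem_cons, not_or] at h
    have hx : x ≠ '}' := fun he => h.1 he.symm
    have ht : '}' ∉ t := h.2
    cases b
    · by_cases hc : x = '{' <;> simp [pvScan, hc] <;> exact ih _ ht
    · simp only [pvScan, hx, ite_false]
      simp only [if_true]
      exact ih _ ht

theorem pvALoop_no_close (l : List Char) (i : Nat) (c : Int)
    (h : '}' ∉ l.drop i) : pvALoop l i c = c := by
  induction hn : l.length - i using Nat.strong_induction_on generalizing i c with
  | _ n ih =>
  by_cases hi : i < l.length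
  · have hnext : '}' ∉ l.drop (i + 1) := fun hm => h (mem_drop_succ l i _ hm)
    by_cases hb : l[i] = '{'
    · have hfind : PySem.Chars.findFrom l ['}'] i none = -1 := by
        rw [PySem.Chars.findFrom_natCast_eq_neg_one_iff l ['}'] i (le_of_lt hi)]
        rw [singleton_infix_iff]; exact h
      rw [pvALoop]
      simp only [hi, dif_pos, hb, if_pos, hfind]
      simp only [ne_eq, not_true_eq_false, dite_false]
      exact ih (l.length - (i + 1)) (by omega) (i + 1) c hnext rfl
    · rw [pvALoop]
      simp only [hi, dif_pos, hb, ite_false]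
      exact ih (l.length - (i + 1)) (by omega) (i + 1) c hnext rfl
  · rw [pvALoop]; simp [hi]

theorem pvScan_skip_to_close (l : List Char) (a b : Nat) (c : Int)
    (hab : a ≤ b) (hb : b < l.length)
    (hmid : ∀ k, a ≤ k → k < b → l[k]? ≠ some '}')
    (hclose : l[b]? = some '}') :
    pvScan (l.drop a) true c = pvScan (l.drop (b + 1)) false (c + 1) := by
  induction hn : b - a using Nat.strong_induction_on generalizing a with
  | _ n ih =>
  have ha : a < l.length := lt_of_le_of_lt hab hb
  rw [List.drop_eq_getElem_cons ha]
  by_cases hae : a = b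
  · subst hae
    have : l[a] = '}' := by
      have := hclose; rw [List.getElem?_eq_getElem ha] at this; simpa using this
    simp [pvScan, this]
  · have hlt : a < b := lt_of_le_of_ne hab hae
    have hne : l[a] ≠ '}' := by
      intro hx
      exact hmid a le_rfl hlt (by rw [List.getElem?_eq_getElem ha, hx])
    simp only [pvScan, hne, ite_false, if_true]
    exact ih (b - (a + 1)) (by omega) (a + 1) hlt
      (fun k hk1 hk2 => hmid k (by omega) hk2) rfl

theorem pvALoop_eq_pvScan (l : List Char) (i : Nat) (c : Int) :
    pvALoop l i c = pvScan (l.drop i) false c := by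
  induction hn : l.length - i using Nat.strong_induction_on generalizing i c with
  | _ n ih =>
  by_cases hi : i < l.length
  · rw [List.drop_eq_getElem_cons hi]
    by_cases hb : l[i] = '{'
    · set j := PySem.Chars.findFrom l ['}'] i none with hjdef
      by_cases hj : j ≠ -1
      · obtain ⟨hj1, hj2, hj3⟩ :=
          PySem.Chars.findFrom_natCast_spec l ['}'] i (le_of_lt hi) hj
        have hpref := hj2
        rw [singleton_prefix_iff] at hpref
        have hjlen : j.toNat < l.length := by
          rcases Nat.lt_or_ge j.toNat l.length with hlt | hge
          · exact hlt
          · rw [List.head?_drop, List.getElem?_eq_none (by omega)] at hpref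
            exact absurd hpref (by simp)
        have hclose : l[j.toNat]? = some '}' := by
          rwa [List.head?_drop] at hpref
        have hij : i < j.toNat := by
          rcases Nat.lt_or_ge i j.toNat with hlt | hge
          · exact hlt
          · have hji : j.toNat = i := by omega
            rw [hji, List.getElem?_eq_getElem hi] at hclose
            simp [hb] at hclose
        have hmid : ∀ k, i + 1 ≤ k → k < j.toNat → l[k]? ≠ some '}' := by
          intro k hk1 hk2 hx
          apply hj3 k (by omega) hk2
          rw [singleton_prefix_iff, List.head?_drop]
          exact hx
        rw [pvALoop]
        simp only [hi, dif_pos, hb, if_pos, ← hjdef]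
        rw [dif_pos hj]
        rw [ih (l.length - (j.toNat + 1)) (by omega) (j.toNat + 1) (c + 1) rfl]
        simp [pvScan]
        exact (pvScan_skip_to_close l (i + 1) j.toNat c hij hjlen hmid hclose).symm
      · have hno : '}' ∉ l.drop i := by
          have hh := (PySem.Chars.findFrom_natCast_eq_neg_one_iff l ['}'] i (le_of_lt hi)).mp
            (by simpa using hj)
          rwa [singleton_infix_iff] at hh
        have hno1 : '}' ∉ l.drop (i + 1) := fun hm => hno (mem_drop_succ l i _ hm)
        rw [pvALoop]
        simp only [hi, dif_pos, hb, if_pos, ← hjdef]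
        rw [dif_neg hj]
        rw [pvALoop_no_close l (i + 1) c hno1]
        simp [pvScan]
        exact (pvScan_no_close (l.drop (i + 1)) true c hno1).symm
    · rw [pvALoop]
      simp only [hi, dif_pos, hb, ite_false]
      rw [ih (l.length - (i + 1)) (by omega) (i + 1) c rfl]
      simp [pvScan, hb]
  · rw [pvALoop]
    simp [hi, List.drop_eq_nil_of_le (le_of_not_gt hi), pvScan]

-- ===== VERDICT (by name: the statement is the Claim_ definition above) =====
theorem count_personalization_tokens_py_spec : Claim_equal_count_personalization_tokens_py := by
  intro s _
  unfold Spec_count_personalization_tokens_py count_personalization_tokens_py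
    count_personalization_tokens_py_alt
  simpa using pvALoop_eq_pvScan s.toList 0 0
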